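-- pv_equiv track=rewrite | github.com/allenfred/py-analyser | lib/quota/magic_nine_turn.py | td
-- ===== SOURCE A (Python) =====
-- def td(close):
--     high_td_series = []
--     low_td_series = []
--
--     for index, value in enumerate(close):
--         if index < 4:
--             high_td_series.insert(index, 0)
--             low_td_series.insert(index, 0)
--         else:
--             # 低9 如果当前收盘价低于四天前收盘价
--             if value < close[index - 4]:
--                 if not low_td_series[index - 1] == 9:
--                     low_td_series.insert(index, low_td_series[index - 1] + 1)
--                 else:
--                     low_td_series.insert(index, 1)
--             else:
--                 low_td_series.insert(index, 0)
--
--             # 高9 如果当前收盘价高于四天前收盘价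
--             if value > close[index - 4]:
--                 if not high_td_series[index - 1] == 9:
--                     high_td_series.insert(index, high_td_series[index - 1] + 1)
--                 else:
--                     high_td_series.insert(index, 1)
--             else:
--                 high_td_series.insert(index, 0)
--
--     return high_td_series, low_td_series
-- ===== SOURCE B (Python) =====
-- def td(close):
--     def expand(flags):
--         out = []
--         i, n = 0, len(flags)
--         while i < n:
--             f = flags[i]
--             j = i + 1
--             while j < n and flags[j] == f:
--                 j += 1
--             if f:
--                 out.extend((k % 9) + 1 for k in range(j - i))
--             else:
--                 out.extend([0] * (j - i))
--             i = j
--         return out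
--     pairs = list(zip(close[4:], close))
--     highs = [c > p for c, p in pairs]
--     lows = [c < p for c, p in pairs]
--     pad = [0] * min(4, len(close))
--     return pad + expand(highs), pad + expand(lows)
-- ===== Notes on version B (the rewrite author's own statement) =====
-- stated objective: alternative
-- what changed: A carries 1-to-9 wrapping streak counters by reading back into the output lists at index-1/index-4; B instead first builds boolean comparison lists from zip(close[4:], close), then run-length-decomposes each into maximal runs and fills every true-run with the closed form (k % 9) + 1 and every false-run with zeros, with no carried counter.
import Mathlib
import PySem

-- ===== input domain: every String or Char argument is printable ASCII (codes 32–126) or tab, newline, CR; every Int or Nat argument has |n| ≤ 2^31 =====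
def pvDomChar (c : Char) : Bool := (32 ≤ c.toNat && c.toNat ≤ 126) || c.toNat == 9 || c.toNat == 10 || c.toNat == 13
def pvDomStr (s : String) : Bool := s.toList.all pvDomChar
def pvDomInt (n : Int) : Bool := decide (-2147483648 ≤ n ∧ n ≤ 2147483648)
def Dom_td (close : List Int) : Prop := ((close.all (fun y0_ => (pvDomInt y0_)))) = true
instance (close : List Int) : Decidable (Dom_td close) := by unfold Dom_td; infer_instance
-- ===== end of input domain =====

-- B replaces A's carried reset-at-9 counters (read back from the output lists) by a two-stage
-- computation: boolean comparison lists, then run-length decomposition with the closed form (k % 9) + 1.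

-- ===== PORT A =====
-- loop body of A; indices close[index-4], series[index-1] are always in range when reached,
-- so pyGetD (default never used) is exact there
def tdStep (close : List Int) (st : List Int × List Int) (p : Int × Int) : List Int × List Int :=
  let index := p.1
  let value := p.2
  let high_td_series := st.1
  let low_td_series := st.2
  if index < 4 then
    (PySem.List.insert high_td_series index 0, PySem.List.insert low_td_series index 0)
  else
    let low' :=
      if value < PySem.List.pyGetD close (index - 4) 0 then
        if ¬ (PySem.List.pyGetD low_td_series (index - 1) 0 = 9) then
          PySem.List.insert low_td_series index (PySem.List.pyGetD low_td_series (index - 1) 0 + 1)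
        else
          PySem.List.insert low_td_series index 1
      else
        PySem.List.insert low_td_series index 0
    let high' :=
      if value > PySem.List.pyGetD close (index - 4) 0 then
        if ¬ (PySem.List.pyGetD high_td_series (index - 1) 0 = 9) then
          PySem.List.insert high_td_series index (PySem.List.pyGetD high_td_series (index - 1) 0 + 1)
        else
          PySem.List.insert high_td_series index 1
      else
        PySem.List.insert high_td_series index 0
    (high', low')

def td (close : List Int) : List Int × List Int :=
  (PySem.List.enumerate close 0).foldl (tdStep close) ([], [])

-- ===== PORT B =====
-- B's expand: the outer while-loop (advance past one maximal run, emit its block) as recursion on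
-- the remaining flags; the inner while-loop counting the run is the takeWhile length
def tdExpand : List Bool → List Int
  | [] => []
  | f :: fs =>
    (if f then (List.range (1 + (fs.takeWhile (· == f)).length)).map (fun k => ((k % 9 : ℕ) : Int) + 1)
     else List.replicate (1 + (fs.takeWhile (· == f)).length) (0 : Int))
      ++ tdExpand (fs.drop (fs.takeWhile (· == f)).length)
termination_by l => l.length
decreasing_by simp

def td_alt (close : List Int) : List Int × List Int :=
  let pairs := (close.drop 4).zip close
  let highs := pairs.map (fun p => decide (p.1 > p.2))
  let lows := pairs.map (fun p => decide (p.1 < p.2))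
  let pad := List.replicate (min 4 close.length) (0 : Int)
  (pad ++ tdExpand highs, pad ++ tdExpand lows)

-- ===== PRECONDITION & SPEC =====
def Spec_td (close : List Int) (out : List Int × List Int) : Prop := out = td_alt close
instance (close : List Int) (out : List Int × List Int) : Decidable (Spec_td close out) := by unfold Spec_td; infer_instance

-- ===== CLAIM (what is proved, stated in full; the proofs are below) =====
def Claim_equal_td : Prop := ∀ (close : List Int), Dom_td close → Spec_td close (td close)

-- ===== LEMMAS AND PROOFS =====

-- reference accumulator form of the loop: both series as appended lists plus the two carried counters
def tdAccStep (st : List Int × List Int × Int × Int) (p : Int × Int) : List Int × List Int × Int × Int :=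
  let cur := p.1
  let prev4 := p.2
  let high_count := if cur > prev4 then (if st.2.2.1 = 9 then 1 else st.2.2.1 + 1) else 0
  let low_count := if cur < prev4 then (if st.2.2.2 = 9 then 1 else st.2.2.2 + 1) else 0
  (st.1 ++ [high_count], st.2.1 ++ [low_count], high_count, low_count)

-- scans of the carried counter, over flag lists and over the raw pairs
def scan1 : Int → List Bool → List Int
  | _, [] => []
  | c, f :: fs =>
    let c' := if f then (if c = 9 then 1 else c + 1) else 0
    c' :: scan1 c' fs

def scanH : Int → List (Int × Int) → List Int
  | _, [] => []
  | c, p :: ps =>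
    let c' := if p.1 > p.2 then (if c = 9 then 1 else c + 1) else 0
    c' :: scanH c' ps

def scanL : Int → List (Int × Int) → List Int
  | _, [] => []
  | c, p :: ps =>
    let c' := if p.1 < p.2 then (if c = 9 then 1 else c + 1) else 0
    c' :: scanL c' ps

-- counter value after k consecutive true steps from 0
def cVal (k : ℕ) : Int := if k = 0 then 0 else (((k - 1) % 9 : ℕ) : Int) + 1

theorem cval_step (k : ℕ) : (if cVal k = 9 then (1 : Int) else cVal k + 1) = cVal (k + 1) := by
  simp only [cVal]
  rcases Nat.eq_zero_or_pos k with h | h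
  · subst h; norm_num
  · rw [if_neg (by omega : ¬ k = 0), if_neg (by omega : ¬ k + 1 = 0)]
    by_cases h9 : ((((k - 1) % 9 : ℕ) : Int) + 1 = 9)
    · rw [if_pos h9]
      have h0 : (k + 1 - 1) % 9 = 0 := by omega
      rw [h0]; norm_num
    · rw [if_neg h9]
      have hstep : (k + 1 - 1) % 9 = (k - 1) % 9 + 1 := by omega
      rw [hstep]; push_cast; ring

theorem scan_rep_true (m : ℕ) : ∀ (rest : List Bool) (k : ℕ),
    scan1 (cVal k) (List.replicate m true ++ rest)
      = (List.range m).map (fun j => cVal (k + j + 1)) ++ scan1 (cVal (k + m)) rest := by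
  induction m with
  | zero => intro rest k; simp
  | succ m ih =>
    intro rest k
    rw [List.replicate_succ, List.cons_append]
    show (if cVal k = 9 then (1:Int) else cVal k + 1) :: _ = _
    rw [cval_step]
    show cVal (k+1) :: scan1 (cVal (k+1)) (List.replicate m true ++ rest) = _
    rw [ih rest (k + 1), show k + 1 + m = k + (m + 1) from by omega, List.range_succ_eq_map]
    simp only [List.map_cons, List.map_map, List.cons_append]
    refine congrArg₂ List.cons (by simp) (congrArg₂ (· ++ ·) ?_ rfl)
    apply List.map_congr_left
    intro j _
    show cVal (k + 1 + j + 1) = cVal (k + (j + 1) + 1)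
    congr 1
    omega

theorem scan_rep_false (m : ℕ) : ∀ (rest : List Bool) (c : Int),
    scan1 c (List.replicate (m + 1) false ++ rest)
      = List.replicate (m + 1) 0 ++ scan1 0 rest := by
  induction m with
  | zero => intro rest c; rfl
  | succ m ih =>
    intro rest c
    rw [List.replicate_succ, List.cons_append]
    show (0 : Int) :: scan1 0 (List.replicate (m + 1) false ++ rest) = _
    rw [ih rest 0]
    rfl

theorem scan1_head_false (c : Int) (l : List Bool) (h : l = [] ∨ ∃ t, l = false :: t) :
    scan1 c l = scan1 0 l := by
  rcases h with h | ⟨t, h⟩ <;> subst h <;> rfl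

theorem drop_len_takeWhile (p : Bool → Bool) (l : List Bool) :
    l.drop (l.takeWhile p).length = l.dropWhile p := by
  induction l with
  | nil => rfl
  | cons x xs ih =>
    by_cases h : p x <;> simp [h, ih]

theorem dropWhile_shape (p : Bool → Bool) (l : List Bool) :
    l.dropWhile p = [] ∨ ∃ b t, l.dropWhile p = b :: t ∧ p b = false := by
  induction l with
  | nil => left; rfl
  | cons x xs ih =>
    by_cases h : p x
    · simpa [h] using ih
    · right; exact ⟨x, xs, by simp [h], by simp [h]⟩

theorem takeWhile_eq_replicate (f : Bool) (l : List Bool) :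
    l.takeWhile (· == f) = List.replicate (l.takeWhile (· == f)).length f := by
  apply List.eq_replicate_of_mem
  intro b hb
  have := List.mem_takeWhile_imp hb
  simpa using this

theorem scan_expand : ∀ (n : ℕ) (l : List Bool), l.length ≤ n → scan1 0 l = tdExpand l := by
  intro n
  induction n with
  | zero =>
    intro l h
    have hnil : l = [] := List.length_eq_zero_iff.mp (Nat.le_zero.mp h)
    subst hnil
    simp [tdExpand, scan1]
  | succ n ih =>
    intro l hl
    match l with
    | [] => simp [tdExpand, scan1]
    | f :: fs =>
      set k := (fs.takeWhile (· == f)).length with hk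
      have hdrop : fs.drop k = fs.dropWhile (· == f) := drop_len_takeWhile _ _
      have hrep : fs.takeWhile (· == f) = List.replicate k f := takeWhile_eq_replicate f fs
      have hlen_rest : (fs.dropWhile (· == f)).length ≤ n := by
        have h1 := List.length_dropWhile_le (· == f) fs
        simp at hl; omega
      have hshape := dropWhile_shape (· == f) fs
      have hfull : f :: fs = List.replicate (k + 1) f ++ fs.dropWhile (· == f) := by
        rw [List.replicate_succ, List.cons_append, ← hrep, List.takeWhile_append_dropWhile]
      rw [tdExpand, hfull]
      cases f with
      | true =>
        have hrest0 : scan1 (cVal (0 + (k + 1))) (fs.dropWhile (· == true))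
            = scan1 0 (fs.dropWhile (· == true)) := by
          apply scan1_head_false
          rcases hshape with h | ⟨b, t, h, hb⟩
          · left; exact h
          · right
            refine ⟨t, ?_⟩
            have hb' : b = false := by revert hb; cases b <;> simp
            rw [h, hb']
        have h1 := scan_rep_true (k + 1) (fs.dropWhile (· == true)) 0
        rw [show cVal 0 = (0 : Int) from rfl] at h1
        rw [h1, hrest0, ih _ hlen_rest, hdrop]
        rw [if_pos rfl, show 1 + k = k + 1 from by omega]
        congr 1
        apply List.map_congr_left
        intro j _
        simp [cVal]
      | false =>
        rw [scan_rep_false k (fs.dropWhile (· == false)) 0, ih _ hlen_rest, hdrop]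
        rw [if_neg (by simp), show 1 + k = k + 1 from by omega]

theorem scanH_eq_scan1 (ps : List (Int × Int)) : ∀ c,
    scanH c ps = scan1 c (ps.map (fun p => decide (p.1 > p.2))) := by
  induction ps with
  | nil => intro c; rfl
  | cons p ps ih =>
    intro c
    simp only [List.map_cons, scanH, scan1, ih]
    by_cases h : p.1 > p.2 <;> simp [h]

theorem scanL_eq_scan1 (ps : List (Int × Int)) : ∀ c,
    scanL c ps = scan1 c (ps.map (fun p => decide (p.1 < p.2))) := by
  induction ps with
  | nil => intro c; rfl
  | cons p ps ih =>
    intro c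
    simp only [List.map_cons, scanL, scan1, ih]
    by_cases h : p.1 < p.2 <;> simp [h]

theorem acc_fold (ps : List (Int × Int)) : ∀ (H L : List Int) (hc lc : Int),
    (ps.foldl tdAccStep (H, L, hc, lc)).1 = H ++ scanH hc ps ∧
    (ps.foldl tdAccStep (H, L, hc, lc)).2.1 = L ++ scanL lc ps := by
  induction ps with
  | nil => intro H L hc lc; simp [scanH, scanL]
  | cons p ps ih =>
    intro H L hc lc
    simp only [List.foldl_cons, tdAccStep]
    obtain ⟨h1, h2⟩ := ih (H ++ [if p.1 > p.2 then (if hc = 9 then 1 else hc + 1) else 0])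
      (L ++ [if p.1 < p.2 then (if lc = 9 then 1 else lc + 1) else 0])
      (if p.1 > p.2 then (if hc = 9 then 1 else hc + 1) else 0)
      (if p.1 < p.2 then (if lc = 9 then 1 else lc + 1) else 0)
    rw [h1, h2]
    simp [scanH, scanL, List.append_assoc]

-- A's loop, from index 4 on, equals the accumulator fold over (current, four-days-ago) pairs
theorem td_main (close : List Int) :
    ∀ (curr : List Int) (i : ℕ) (H L : List Int) (hc lc : Int),
      4 ≤ i → curr = close.drop i →
      H.length = i → L.length = i →
      PySem.List.pyGetD H ((i : Int) - 1) 0 = hc →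
      PySem.List.pyGetD L ((i : Int) - 1) 0 = lc →
      (PySem.List.enumerate curr (i : Int)).foldl (tdStep close) (H, L) =
        (((curr.zip (close.drop (i - 4))).foldl tdAccStep (H, L, hc, lc)).1,
         ((curr.zip (close.drop (i - 4))).foldl tdAccStep (H, L, hc, lc)).2.1) := by
  intro curr
  induction curr with
  | nil => intro i H L hc lc _ _ _ _ _ _; simp [PySem.List.enumerate_nil]
  | cons c rest ih =>
    intro i H L hc lc h4 hdrop hH hL hhc hlc
    have hlen : i < close.length := by
      by_contra h
      rw [List.drop_eq_nil_of_le (by omega)] at hdrop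
      simp at hdrop
    have hdropc : close.drop i = close[i] :: close.drop (i + 1) :=
      List.drop_eq_getElem_cons hlen
    rw [hdropc] at hdrop
    obtain ⟨hcval, hrest⟩ : c = close[i] ∧ rest = close.drop (i + 1) := by
      constructor <;> [exact (List.cons.injEq _ _ _ _ ▸ hdrop).1; exact (List.cons.injEq _ _ _ _ ▸ hdrop).2]
    have h4lt : i - 4 < close.length := by omega
    have hdrop4 : close.drop (i - 4) = close[i - 4] :: close.drop (i - 3) := by
      rw [List.drop_eq_getElem_cons h4lt, show i - 4 + 1 = i - 3 from by omega]
    have hget4 : PySem.List.pyGetD close ((i : Int) - 4) 0 = close[i - 4] := by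
      rw [show ((i : Int) - 4) = ((i - 4 : ℕ) : Int) by omega, PySem.List.pyGetD_natCast]
      simp [List.getD, h4lt]
    set hc' : Int := if c > close[i - 4] then (if hc = 9 then 1 else hc + 1) else 0 with hhc'
    set lc' : Int := if c < close[i - 4] then (if lc = 9 then 1 else lc + 1) else 0 with hlc'
    have hinsH : ∀ x : Int, PySem.List.insert H (i : Int) x = H ++ [x] := by
      intro x
      rw [PySem.List.insert_natCast H i x (by omega)]
      simp [hH, List.take_of_length_le, List.drop_eq_nil_of_le]
    have hinsL : ∀ x : Int, PySem.List.insert L (i : Int) x = L ++ [x] := by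
      intro x
      rw [PySem.List.insert_natCast L i x (by omega)]
      simp [hL, List.take_of_length_le, List.drop_eq_nil_of_le]
    have hstep : tdStep close (H, L) ((i : Int), c) = (H ++ [hc'], L ++ [lc']) := by
      simp only [tdStep, hget4, hhc, hlc, hinsH, hinsL]
      rw [if_neg (by omega)]
      by_cases h1 : c > close[i - 4] <;> by_cases h2 : hc = 9 <;>
        by_cases h3 : c < close[i - 4] <;> by_cases h4' : lc = 9 <;>
        simp [hhc', hlc', h1, h2, h3, h4']
    have haltstep : tdAccStep (H, L, hc, lc) (c, close[i - 4]) = (H ++ [hc'], L ++ [lc'], hc', lc') := by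
      simp [tdAccStep, hhc', hlc']
    have hgetH' : PySem.List.pyGetD (H ++ [hc']) (((i + 1 : ℕ) : Int) - 1) 0 = hc' := by
      rw [show (((i + 1 : ℕ) : Int) - 1) = ((i : ℕ) : Int) by omega, PySem.List.pyGetD_natCast, ← hH]
      simp [List.getD]
    have hgetL' : PySem.List.pyGetD (L ++ [lc']) (((i + 1 : ℕ) : Int) - 1) 0 = lc' := by
      rw [show (((i + 1 : ℕ) : Int) - 1) = ((i : ℕ) : Int) by omega, PySem.List.pyGetD_natCast, ← hL]
      simp [List.getD]
    have := ih (i + 1) (H ++ [hc']) (L ++ [lc']) hc' lc' (by omega) hrest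
      (by simp [hH]) (by simp [hL]) hgetH' hgetL'
    rw [PySem.List.enumerate_cons, List.foldl_cons, hstep,
        show ((i : Int) + 1) = ((i + 1 : ℕ) : Int) by omega, this,
        hdrop4, List.zip_cons_cons, List.foldl_cons, haltstep,
        show i + 1 - 4 = i - 3 by omega]

theorem td_spec' : ∀ (close : List Int), td close = td_alt close := by
  intro close
  match close with
  | [] => simp [td, td_alt, tdExpand, PySem.List.enumerate_nil]
  | [a] =>
    simp [td, td_alt, tdStep, tdExpand, PySem.List.enumerate_cons, PySem.List.enumerate_nil,
      PySem.List.insert_zero]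
  | [a, b] =>
    simp [td, td_alt, tdStep, tdExpand, PySem.List.enumerate_cons, PySem.List.enumerate_nil,
      PySem.List.insert_ofNat]
  | [a, b, c] =>
    simp [td, td_alt, tdStep, tdExpand, PySem.List.enumerate_cons, PySem.List.enumerate_nil,
      PySem.List.insert_ofNat]
  | a :: b :: c :: d :: rest =>
    have hmain := td_main (a :: b :: c :: d :: rest) rest 4 [0,0,0,0] [0,0,0,0] 0 0
      (le_refl 4) rfl rfl rfl (by decide) (by decide)
    obtain ⟨hfH, hfL⟩ := acc_fold (rest.zip (a :: b :: c :: d :: rest)) [0,0,0,0] [0,0,0,0] 0 0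
    simp only [td, PySem.List.enumerate_cons, List.foldl_cons]
    norm_num [tdStep, PySem.List.insert_zero, PySem.List.insert_ofNat]
    rw [show (4:Int) = ((4:ℕ):Int) from rfl, hmain]
    simp only [show (4 - 4 : ℕ) = 0 from rfl, List.drop_zero]
    rw [hfH, hfL]
    have hH := scanH_eq_scan1 (rest.zip (a :: b :: c :: d :: rest)) 0
    have hL := scanL_eq_scan1 (rest.zip (a :: b :: c :: d :: rest)) 0
    rw [hH, hL,
      scan_expand _ _ (le_refl _), scan_expand _ _ (le_refl _)]
    simp [td_alt, List.replicate_succ]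

-- ===== VERDICT (by name: the statement is the Claim_ definition above) =====
theorem td_spec : Claim_equal_td := by
  intro close _
  unfold Spec_td
  exact td_spec' close
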